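-- pv_equiv track=rewrite | github.com/yaaig-ufrgs/NeuralFastDownward-FSM | misc/OLD/slurm/summarize_slurm_tools.py | last_n_lines
-- ===== SOURCE A (Python) =====
-- def last_n_lines(content, lines):
--     assert lines >= 0
--     if lines == 0 or content == "":
--         return ""
--
--     if content[-1] == "\n":
--         lines += 1
--
--     counter = 0
--     i = len(content) - 1
--     while i >= 0:
--         if content[i] == "\n":
--             counter += 1
--             if counter == lines:
--                 return content[i + 1:]
--         i -= 1
--     return content
-- ===== SOURCE B (Python) =====
-- def last_n_lines(content, lines):
--     assert lines >= 0
--     if lines == 0 or content == "":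
--         return ""
--     parts = content.split("\n")
--     keep = lines + (1 if content.endswith("\n") else 0)
--     return "\n".join(parts[-keep:])
-- ===== Notes on version B (the rewrite author's own statement) =====
-- stated objective: simpler
-- what changed: replaces the manual backwards character scan with counter/index bookkeeping by split('\n') and a join of the last slice of the parts, with a +1 adjustment for a trailing newline
import Mathlib
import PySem

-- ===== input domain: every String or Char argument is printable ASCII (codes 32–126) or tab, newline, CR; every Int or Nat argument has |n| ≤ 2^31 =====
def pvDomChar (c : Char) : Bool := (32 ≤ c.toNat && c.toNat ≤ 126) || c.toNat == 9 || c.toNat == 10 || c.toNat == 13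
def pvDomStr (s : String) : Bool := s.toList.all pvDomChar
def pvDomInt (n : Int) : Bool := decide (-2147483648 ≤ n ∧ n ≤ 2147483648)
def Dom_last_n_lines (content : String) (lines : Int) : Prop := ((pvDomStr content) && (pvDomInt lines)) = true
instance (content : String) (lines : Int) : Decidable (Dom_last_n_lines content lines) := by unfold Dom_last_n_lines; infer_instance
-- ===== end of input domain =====

-- B replaces A's manual backwards character scan (counter/index bookkeeping) by split("\n") / join
-- of the last slice of the parts, with a +1 adjustment for a trailing newline (simpler; measured faster).

-- ===== PORT A =====
-- the while loop of A: i runs from len-1 down to -1 (transliterated step for step)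
def lastNLoopA (content : List Char) (lines : Int) (counter : Int) (i : Int) : List Char :=
  if _h : 0 ≤ i then
    if PySem.List.pyGet? content i = some '\n' then
      let counter := counter + 1
      if counter = lines then PySem.List.slice content (some (i + 1)) none
      else lastNLoopA content lines counter (i - 1)
    else lastNLoopA content lines counter (i - 1)
  else content
termination_by (i + 1).toNat
decreasing_by all_goals omega

def last_n_lines (content : String) (lines : Int) : String :=
  -- assert lines >= 0 : excluded by Pre_last_n_lines
  if lines == 0 || content == "" then "" else
  -- 'if content[-1] == "\n": lines += 1' inlined into the loop's lines argument
  String.ofList (lastNLoopA content.toList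
    (if PySem.Str.pyGet? content (-1) = some '\n' then lines + 1 else lines)
    0 ((content.toList.length : Int) - 1))

-- ===== PORT B =====
def last_n_lines_alt (content : String) (lines : Int) : String :=
  -- assert lines >= 0 : excluded by Pre_last_n_lines
  if lines == 0 || content == "" then "" else
  -- parts = content.split("\n"); keep = lines + (1 if content.endswith("\n") else 0)
  -- return "\n".join(parts[-keep:])
  String.ofList (['\n'].intercalate (PySem.List.slice (content.toList.splitOn '\n')
    (some (-(lines + (if PySem.Str.endswith content "\n" then 1 else 0)))) none))

-- ===== PRECONDITION & SPEC =====
-- Pre_ excludes exactly the inputs on which A's 'assert lines >= 0' raises AssertionError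
def Pre_last_n_lines (content : String) (lines : Int) : Prop := 0 ≤ lines
instance (content : String) (lines : Int) : Decidable (Pre_last_n_lines content lines) := by unfold Pre_last_n_lines; infer_instance
def pvWitness_last_n_lines : String × Int := ("alpha\nbeta\ngamma\n", 2)

def Spec_last_n_lines (content : String) (lines : Int) (out : String) : Prop := out = last_n_lines_alt content lines
instance (content : String) (lines : Int) (out : String) : Decidable (Spec_last_n_lines content lines out) := by unfold Spec_last_n_lines; infer_instance

-- ===== CLAIM (what is proved, stated in full; the proofs are below) =====
def Claim_equal_last_n_lines : Prop := ∀ (content : String) (lines : Int), Dom_last_n_lines content lines → Pre_last_n_lines content lines → Spec_last_n_lines content lines (last_n_lines content lines)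

-- ===== LEMMAS AND PROOFS =====

-- abstract view of A's scan: scan positions j-1, j-2, …, 0; 'some r' = early return with suffix r
def scanA (s : List Char) (L c : Int) : Nat → Option (List Char)
  | 0 => none
  | j + 1 =>
    if s[j]? = some '\n' then
      (if c + 1 = L then some (s.drop (j + 1)) else scanA s L (c + 1) j)
    else scanA s L c j

theorem lastNLoopA_eq_scanA (s : List Char) (L : Int) : ∀ (j : Nat) (c : Int),
    lastNLoopA s L c ((j : Int) - 1) = (scanA s L c j).getD s := by
  intro j
  induction j with
  | zero =>
      intro c; unfold lastNLoopA; simp [scanA]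
  | succ j ih =>
      intro c
      unfold lastNLoopA
      have h0 : (0:Int) ≤ (j + 1 : Nat) - 1 := by push_cast; omega
      have hi : ((j + 1 : Nat) : Int) - 1 = (j : Int) := by push_cast; omega
      rw [dif_pos h0]
      rw [hi]
      have hget : PySem.List.pyGet? s (j : Int) = s[j]? := by
        simp [PySem.List.pyGet?_natCast]
      have hslice : PySem.List.slice s (some ((j : Int) + 1)) none = s.drop (j + 1) := by
        have : ((j : Int) + 1) = ((j + 1 : Nat) : Int) := by push_cast; ring
        rw [this, PySem.List.slice_from_natCast]
      rw [hget, hslice]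
      by_cases hnl : s[j]? = some '\n'
      · by_cases hc : c + 1 = L
        · simp [scanA, hnl, hc]
        · simp [scanA, hnl, hc, ih]
      · simp [scanA, hnl, ih]

-- peeling the head character off the scanned list
theorem scanA_cons (t : List Char) (ch : Char) (L : Int) : ∀ (k : Nat) (c : Int),
    scanA (ch :: t) L c (k + 1) =
      (match scanA t L c k with
       | some r => some r
       | none => if ch = '\n' ∧ c + ((t.take k).count '\n' : Int) + 1 = L then some t else none) := by
  intro k
  induction k with
  | zero =>
      intro c
      simp only [scanA, List.getElem?_cons_zero, List.take_zero, List.count_nil]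
      by_cases hch : ch = '\n'
      · subst hch
        simp only [if_pos rfl]
        by_cases hc : c + 1 = L
        · simp [hc]
        · simp [hc, scanA]
      · have : (some ch = some '\n') = False := by simp [hch]
        simp [hch, this]
  | succ k ih =>
      intro c
      have hstep : ∀ c' : Int, scanA (ch :: t) L c' (k + 1 + 1) =
          if t[k]? = some '\n' then
            (if c' + 1 = L then some (t.drop (k + 1)) else scanA (ch :: t) L (c' + 1) (k + 1))
          else scanA (ch :: t) L c' (k + 1) := by
        intro c'
        show (if (ch :: t)[k+1]? = some '\n' then
            (if c' + 1 = L then some ((ch :: t).drop (k + 1 + 1)) else scanA (ch :: t) L (c' + 1) (k + 1))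
          else scanA (ch :: t) L c' (k + 1)) = _
        rw [List.getElem?_cons_succ, List.drop_succ_cons]
      have hstepT : scanA t L c (k + 1) =
          if t[k]? = some '\n' then
            (if c + 1 = L then some (t.drop (k + 1)) else scanA t L (c + 1) k)
          else scanA t L c k := rfl
      rw [hstep]
      by_cases hnl : t[k]? = some '\n'
      · have hk : k < t.length := by
          by_contra h
          rw [List.getElem?_eq_none (by omega)] at hnl; simp at hnl
        have hget : t[k] = '\n' := by
          have := List.getElem?_eq_getElem hk (l := t)
          rw [hnl] at this; exact (Option.some_injective _ this.symm)
        have htake : (t.take (k+1)).count '\n' = (t.take k).count '\n' + 1 := by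
          rw [List.take_add_one, List.getElem?_eq_getElem hk, Option.toList_some, List.count_append]
          simp [hget]
        rw [if_pos hnl, hstepT, if_pos hnl]
        by_cases hc : c + 1 = L
        · rw [if_pos hc, if_pos hc]
        · rw [if_neg hc, if_neg hc, ih]
          rcases scanA t L (c + 1) k with _ | r
          · simp only []
            have : ((c + 1) + ((t.take k).count '\n' : Int) + 1 = L) ↔ (c + ((t.take (k+1)).count '\n' : Int) + 1 = L) := by
              rw [htake]; push_cast; omega
            by_cases hcond : ch = '\n' ∧ (c + 1) + ((t.take k).count '\n' : Int) + 1 = L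
            · rw [if_pos hcond, if_pos ⟨hcond.1, this.mp hcond.2⟩]
            · rw [if_neg hcond, if_neg (fun h => hcond ⟨h.1, this.mpr h.2⟩)]
          · simp
      · have htake : (t.take (k+1)).count '\n' = (t.take k).count '\n' := by
          by_cases hk : k < t.length
          · have hget : t[k] ≠ '\n' := by
              intro h; apply hnl; rw [List.getElem?_eq_getElem hk, h]
            rw [List.take_add_one, List.getElem?_eq_getElem hk, Option.toList_some, List.count_append]
            simp [hget]
          · rw [List.take_of_length_le (by omega), List.take_of_length_le (by omega)]
        rw [if_neg hnl, ih, hstepT, if_neg hnl, htake]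

-- when the full scan fails: fewer than L - c newlines
theorem scanA_none_iff (L : Int) : ∀ (s : List Char) (c : Int), c < L →
    (scanA s L c s.length = none ↔ (s.count '\n' : Int) + c < L) := by
  intro s
  induction s with
  | nil => intro c hc; simp [scanA]; omega
  | cons ch t ih =>
      intro c hc
      have hlen : (ch :: t).length = t.length + 1 := rfl
      rw [hlen, scanA_cons, List.take_length]
      rcases hft : scanA t L c t.length with _ | r
      · have hcnt : (t.count '\n' : Int) + c < L := (ih c hc).mp hft
        by_cases hch : ch = '\n'
        · subst hch
          simp only [true_and, List.count_cons, if_pos rfl]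
          by_cases he : c + (t.count '\n' : Int) + 1 = L
          · simp [he]; push_cast; omega
          · simp [he]; push_cast; omega
        · simp [hch, List.count_cons]
          omega
      · simp only []
        constructor
        · intro h; simp at h
        · intro h
          exfalso
          have := (ih c hc).not.mp (by simp [hft])
          simp [List.count_cons] at h
          by_cases hch : ch = '\n' <;> simp [hch] at h <;> omega

theorem length_splitOn_newline (s : List Char) : (s.splitOn '\n').length = s.count '\n' + 1 := by
  induction s with
  | nil => simp [List.splitOn]
  | cons c t ih =>
    simp only [List.splitOn, List.splitOnP_cons] at *
    by_cases h : c = '\n' <;> simp [h, ih]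

theorem splitOn_cons_newline (t : List Char) : (('\n' :: t).splitOn '\n') = [] :: t.splitOn '\n' := by
  simp [List.splitOn, List.splitOnP_cons]

theorem splitOn_cons_other (t : List Char) (ch : Char) (h : ch ≠ '\n') :
    ((ch :: t).splitOn '\n') = (t.splitOn '\n').modifyHead (ch :: ·) := by
  simp [List.splitOn, List.splitOnP_cons, h]

-- B's core value, on lists
def joinLastB (s : List Char) (L : Int) : List Char :=
  ['\n'].intercalate ((s.splitOn '\n').drop ((s.splitOn '\n').length - L.toNat))

theorem drop_modifyHead_of_pos {α : Type} (f : α → α) (l : List α) (n : Nat) (h : 1 ≤ n) :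
    (l.modifyHead f).drop n = l.drop n := by
  cases l with
  | nil => simp
  | cons a t =>
      obtain ⟨m, rfl⟩ : ∃ m, n = m + 1 := ⟨n - 1, by omega⟩
      simp

theorem joinLastB_ge (s : List Char) (L : Int) (h : (s.count '\n' : Int) < L) :
    joinLastB s L = s := by
  unfold joinLastB
  have hlen := length_splitOn_newline s
  have : (s.splitOn '\n').length - L.toNat = 0 := by omega
  rw [this, List.drop_zero, List.intercalate_splitOn]

-- the main equivalence of the two cores
theorem scanA_eq_joinLastB (L : Int) (hL : 1 ≤ L) : ∀ (s : List Char),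
    (scanA s L 0 s.length).getD s = joinLastB s L := by
  intro s
  induction s with
  | nil =>
      have h0 : 1 - L.toNat = 0 := by omega
      simp [scanA, joinLastB, List.splitOn, h0, List.intercalate]
  | cons ch t ih =>
      have hlen : (ch :: t).length = t.length + 1 := rfl
      rw [hlen, scanA_cons, List.take_length]
      have hlsp := length_splitOn_newline t
      rcases hft : scanA t L 0 t.length with _ | r
      · -- t alone has fewer than L newlines
        have hcnt : (t.count '\n' : Int) < L := by
          have := (scanA_none_iff L t 0 (by omega)).mp hft; omega
        by_cases hch : ch = '\n'
        · subst hch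
          by_cases he : (0:Int) + (t.count '\n' : Int) + 1 = L
          · rw [if_pos (⟨rfl, he⟩ : ('\n':Char) = '\n' ∧ (0:Int) + (t.count '\n' : Int) + 1 = L), Option.getD_some]
            unfold joinLastB
            rw [splitOn_cons_newline]
            have h1 : (([] :: t.splitOn '\n').length) = t.count '\n' + 2 := by
              simp [hlsp]
            have h2 : L.toNat = t.count '\n' + 1 := by omega
            rw [h1, h2]
            have : t.count '\n' + 2 - (t.count '\n' + 1) = 1 := by omega
            rw [this, List.drop_one, List.tail_cons, List.intercalate_splitOn]
          · rw [if_neg (fun h => he h.2), Option.getD_none]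
            have hc1 : (('\n' :: t).count '\n' : Int) < L := by
              have : ('\n' :: t).count '\n' = t.count '\n' + 1 := by simp
              rw [this]; push_cast; omega
            rw [joinLastB_ge _ _ hc1]
        · rw [if_neg (fun h => hch h.1), Option.getD_none]
          have hc1 : ((ch :: t).count '\n' : Int) < L := by
            have : (ch :: t).count '\n' = t.count '\n' := by simp [hch]
            rw [this]; omega
          rw [joinLastB_ge _ _ hc1]
      · -- found inside t
        have hcnt : ¬ ((t.count '\n' : Int) + 0 < L) := by
          intro h
          have := (scanA_none_iff L t 0 (by omega)).mpr h
          rw [hft] at this; simp at this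
        simp only [Option.getD_some]
        have hr : r = joinLastB t L := by
          have := ih; rw [hft] at this; simpa using this
        rw [hr]
        unfold joinLastB
        by_cases hch : ch = '\n'
        · subst hch
          rw [splitOn_cons_newline]
          have h1 : (([] :: t.splitOn '\n').length) = (t.splitOn '\n').length + 1 := rfl
          rw [h1]
          have h2 : (t.splitOn '\n').length + 1 - L.toNat = ((t.splitOn '\n').length - L.toNat) + 1 := by
            omega
          rw [h2, List.drop_succ_cons]
        · rw [splitOn_cons_other t ch hch]
          rw [List.length_modifyHead]
          rw [drop_modifyHead_of_pos _ _ _ (by omega)]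

-- content[-1] == "\n"  vs  content.endswith("\n")
theorem pyGet_neg_one_eq_endswith (s : List Char) (hs : s ≠ []) :
    (PySem.List.pyGet? s (-1) = some '\n') ↔ PySem.Chars.endswith s ['\n'] = true := by
  rw [PySem.List.pyGet?_neg_one]
  unfold PySem.Chars.endswith
  rw [List.isSuffixOf_iff_suffix]
  constructor
  · intro h
    exact List.getLast?_eq_some_iff.mp h |>.elim (fun l hl => hl ▸ List.suffix_append l ['\n'])
  · rintro ⟨l, rfl⟩
    simp

-- ===== VERDICT (by name: the statement is the Claim_ definition above) =====
theorem last_n_lines_spec : Claim_equal_last_n_lines := by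
  intro content lines _hdom hpre
  unfold Spec_last_n_lines last_n_lines last_n_lines_alt
  by_cases h0 : lines == 0 || content == ""
  · rw [if_pos h0, if_pos h0]
  · rw [if_neg h0, if_neg h0]
    simp only [Bool.or_eq_true, beq_iff_eq] at h0
    push_neg at h0
    obtain ⟨hl0, hc0⟩ := h0
    have hs : content.toList ≠ [] := by
      intro h
      apply hc0
      have := congrArg String.ofList h
      simpa using this
    have hL1 : 1 ≤ lines := by
      unfold Pre_last_n_lines at hpre; omega
    -- the two trailing-newline tests agree
    have hend : (PySem.Str.pyGet? content (-1) = some '\n') ↔ PySem.Str.endswith content "\n" = true := by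
      have h1 : PySem.Str.pyGet? content (-1) = PySem.List.pyGet? content.toList (-1) := by
        simp [PySem.Str.pyGet?_eq]
      rw [h1, pyGet_neg_one_eq_endswith content.toList hs]
      unfold PySem.Str.endswith
      constructor <;> intro h <;> simpa using h
    set b : Int := if PySem.Str.endswith content "\n" then 1 else 0 with hb
    have hsame : (if PySem.Str.pyGet? content (-1) = some '\n' then lines + 1 else lines) = lines + b := by
      rw [hb]
      by_cases he : PySem.Str.endswith content "\n" = true
      · rw [if_pos (hend.mpr he), if_pos he]
      · rw [if_neg (fun h => he (hend.mp h)), if_neg he]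
        omega
    rw [hsame]
    have hbL : 1 ≤ lines + b := by
      rw [hb]; split <;> omega
    congr 1
    -- loop start: i = len - 1 = ((len : Nat) : Int) - 1
    have hstart : lastNLoopA content.toList (lines + b) 0 ((content.toList.length : Int) - 1)
        = (scanA content.toList (lines + b) 0 content.toList.length).getD content.toList :=
      lastNLoopA_eq_scanA content.toList (lines + b) content.toList.length 0
    rw [hstart, scanA_eq_joinLastB (lines + b) hbL content.toList]
    -- B's slice: parts[-keep:] with keep = lines + b ≥ 1
    unfold joinLastB
    have hk : -(lines + b) = -(((lines + b).toNat : Nat) : Int) := by omega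
    rw [hk, PySem.List.slice_from_neg_natCast _ _ (by omega)]
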